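-- pv_equiv track=rewrite | github.com/Bladjot/Certamen-3-Lenguaje-Programacion | search.py | recursive_intersect
-- ===== SOURCE A (Python) =====
-- from typing import Dict, List, Optional, Set, Tuple
--
-- def recursive_intersect(
--     words: List[str],
--     index: Dict[str, Set[str]],
--     pos: int = 0,
--     acc: Optional[Set[str]] = None,
--     trace: Optional[List[Tuple[str, List[str], List[str]]]] = None,
-- ) -> Tuple[Set[str], List[Tuple[str, List[str], List[str]]]]:
--     """Calcula la intersección recursiva y guarda el trazo de cada paso."""
--     if trace is None:
--         trace = []
--     if pos >= len(words):
--         return (acc or set(), trace)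
--     current_docs = index.get(words[pos], set())
--     acc = current_docs if acc is None else acc & current_docs
--     trace.append((words[pos], sorted(current_docs), sorted(acc)))
--     return recursive_intersect(words, index, pos + 1, acc, trace)
-- ===== SOURCE B (Python) =====
-- def recursive_intersect(words, index, pos=0, acc=None, trace=None):
--     """Iterative re-implementation: one while-loop instead of recursion."""
--     if trace is None:
--         trace = []
--     n = len(words)
--     while pos < n:
--         current_docs = index.get(words[pos], set())
--         acc = current_docs if acc is None else acc & current_docs
--         trace.append((words[pos], sorted(current_docs), sorted(acc)))
--         pos += 1
--     return (acc or set(), trace)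
-- ===== Notes on version B (the rewrite author's own statement) =====
-- stated objective: simpler
-- what changed: Replaces the tail recursion (one Python call frame per word, re-checking 'trace is None' and the 'acc or set()' base case on every call) with a single while-loop that normalizes trace once and carries acc in place, avoiding recursion-depth limits.
import Mathlib
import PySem

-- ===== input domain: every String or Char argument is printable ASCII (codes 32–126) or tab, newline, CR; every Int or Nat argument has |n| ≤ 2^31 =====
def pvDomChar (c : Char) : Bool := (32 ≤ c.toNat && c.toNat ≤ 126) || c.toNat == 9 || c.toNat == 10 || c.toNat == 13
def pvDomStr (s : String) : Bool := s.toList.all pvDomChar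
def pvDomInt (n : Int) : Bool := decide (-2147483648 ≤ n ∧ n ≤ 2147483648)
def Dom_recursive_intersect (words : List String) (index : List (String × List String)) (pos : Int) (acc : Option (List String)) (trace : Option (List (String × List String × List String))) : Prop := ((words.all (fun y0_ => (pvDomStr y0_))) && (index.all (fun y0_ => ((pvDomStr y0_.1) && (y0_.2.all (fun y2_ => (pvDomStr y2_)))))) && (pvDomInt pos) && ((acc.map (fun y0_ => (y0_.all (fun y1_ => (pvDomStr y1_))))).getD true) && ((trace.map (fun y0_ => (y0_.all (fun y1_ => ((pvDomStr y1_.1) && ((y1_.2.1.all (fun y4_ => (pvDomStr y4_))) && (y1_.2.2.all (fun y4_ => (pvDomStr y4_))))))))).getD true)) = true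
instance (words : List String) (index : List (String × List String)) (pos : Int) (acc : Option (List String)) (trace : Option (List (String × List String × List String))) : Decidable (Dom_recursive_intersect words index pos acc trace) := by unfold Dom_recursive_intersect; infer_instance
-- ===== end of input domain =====

-- B replaces the tail recursion with one iterative fold over range(pos, len(words)) (simpler decomposition).
-- A and B both append the computed steps to the caller-supplied trace list in place; the equivalence proved
-- here is about the RETURN value (B performs the same mutation).

-- ===== PORT A =====
-- literal transliteration of A's tail recursion; terminates because len(words) - pos shrinks
def recursive_intersect (words : List String) (index : List (String × List String)) (pos : Int) (acc : Option (List String)) (trace : Option (List (String × List String × List String))) : List String × (List (String × List String × List String)) :=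
  let tr := trace.getD []                       -- if trace is None: trace = []
  if _h : pos ≥ (words.length : Int) then
    (acc.getD [], tr)                           -- (acc or set(), trace): some [] and none both yield []
  else
    match PySem.List.pyGet? words pos with
    | none => ([], [])                          -- words[pos] IndexError (pos < -len); excluded by Pre_
    | some w =>
      let current := (List.lookup w index).getD []          -- index.get(words[pos], set())
      let acc' := match acc with
        | none => current
        | some a => PySem.Set.inter a current               -- acc & current_docs
      let tr' := tr ++ [(w, PySem.List.sorted current (fun x => x) false,
                            PySem.List.sorted acc' (fun x => x) false)]
      recursive_intersect words index (pos + 1) (some acc') (some tr')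
termination_by ((words.length : Int) - pos).toNat
decreasing_by omega

-- ===== PORT B =====
-- literal transliteration of Source B: riLoop is the while-loop (state pos, acc, trace); it stops early
-- where words[pos] would raise IndexError (outside Pre_)
def riLoop (words : List String) (index : List (String × List String)) (pos : Int) (acc : Option (List String)) (tr : List (String × List String × List String)) : Option (List String) × List (String × List String × List String) :=
  if _h : pos < (words.length : Int) then
    match PySem.List.pyGet? words pos with
    | none => (acc, tr)                                     -- words[pos] IndexError (pos < -len); excluded by Pre_
    | some w =>
      let current := (List.lookup w index).getD []          -- index.get(words[pos], set())
      let acc' := match acc with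
        | none => current
        | some a => PySem.Set.inter a current               -- acc & current_docs
      riLoop words index (pos + 1) (some acc')
        (tr ++ [(w, PySem.List.sorted current (fun x => x) false,
                    PySem.List.sorted acc' (fun x => x) false)])
  else (acc, tr)
termination_by ((words.length : Int) - pos).toNat
decreasing_by omega

def recursive_intersect_alt (words : List String) (index : List (String × List String)) (pos : Int) (acc : Option (List String)) (trace : Option (List (String × List String × List String))) : List String × (List (String × List String × List String)) :=
  let st := riLoop words index pos acc (trace.getD [])      -- if trace is None: trace = []
  (st.1.getD [], st.2)                                      -- (acc or set(), trace)

-- ===== PRECONDITION & SPEC =====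
-- Pre_ excludes only pos < -len(words), where A raises IndexError on words[pos].
def Pre_recursive_intersect (words : List String) (index : List (String × List String)) (pos : Int) (acc : Option (List String)) (trace : Option (List (String × List String × List String))) : Prop := -(words.length : Int) ≤ pos
instance (words : List String) (index : List (String × List String)) (pos : Int) (acc : Option (List String)) (trace : Option (List (String × List String × List String))) : Decidable (Pre_recursive_intersect words index pos acc trace) := by unfold Pre_recursive_intersect; infer_instance
def pvWitness_recursive_intersect : List String × (List (String × List String)) × Int × Option (List String) × (Option (List (String × List String × List String))) := (["a", "b"], [("a", ["x", "y"]), ("b", ["y"])], 0, none, none)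

def Spec_recursive_intersect (words : List String) (index : List (String × List String)) (pos : Int) (acc : Option (List String)) (trace : Option (List (String × List String × List String))) (out : List String × (List (String × List String × List String))) : Prop := out = recursive_intersect_alt words index pos acc trace
instance (words : List String) (index : List (String × List String)) (pos : Int) (acc : Option (List String)) (trace : Option (List (String × List String × List String))) (out : List String × (List (String × List String × List String))) : Decidable (Spec_recursive_intersect words index pos acc trace out) := by unfold Spec_recursive_intersect; infer_instance

-- ===== CLAIM (what is proved, stated in full; the proofs are below) =====
def Claim_equal_recursive_intersect : Prop := ∀ (words : List String) (index : List (String × List String)) (pos : Int) (acc : Option (List String)) (trace : Option (List (String × List String × List String))), Dom_recursive_intersect words index pos acc trace → Pre_recursive_intersect words index pos acc trace → Spec_recursive_intersect words index pos acc trace (recursive_intersect words index pos acc trace)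

-- ===== LEMMAS AND PROOFS =====

theorem key_lemma (words : List String) (index : List (String × List String)) :
    ∀ (n : Nat) (pos : Int) (acc : Option (List String)) (trace : Option (List (String × List String × List String))),
      ((words.length : Int) - pos).toNat = n → -(words.length : Int) ≤ pos →
      recursive_intersect words index pos acc trace = recursive_intersect_alt words index pos acc trace := by
  intro n
  induction n with
  | zero =>
    intro pos acc trace hn hge
    have hpos : (words.length : Int) ≤ pos := by omega
    rw [recursive_intersect, recursive_intersect_alt, riLoop]
    simp [hpos, not_lt.mpr hpos]
  | succ m ih =>
    intro pos acc trace hn hge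
    have hlt : pos < (words.length : Int) := by omega
    have hin : PySem.Raise.InRange words.length pos := by
      constructor <;> omega
    obtain ⟨w, hw⟩ : ∃ w, PySem.List.pyGet? words pos = some w := by
      rcases h : PySem.List.pyGet? words pos with _ | w
      · rw [PySem.List.pyGet?_eq_none_iff] at h
        exact absurd hin h
      · exact ⟨w, rfl⟩
    rw [recursive_intersect]
    simp only [ge_iff_le, not_le.mpr hlt, dite_false, hw, dif_neg (not_le.mpr hlt)]
    rw [ih (pos + 1) _ _ (by omega) (by omega)]
    rw [recursive_intersect_alt, recursive_intersect_alt]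
    conv_rhs => rw [riLoop]
    simp [hlt, hw]

-- ===== VERDICT (by name: the statement is the Claim_ definition above) =====
theorem recursive_intersect_spec : Claim_equal_recursive_intersect := by
  intro words index pos acc trace _hDom hPre
  unfold Spec_recursive_intersect
  exact key_lemma words index _ pos acc trace rfl hPre
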